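-- pv_equiv track=rewrite | github.com/fersrm/proyecto_fab | utils/helpers.py | list_chats
-- ===== SOURCE A (Python) =====
-- from collections import defaultdict
--
-- def list_chats(query):
--     region_counts = defaultdict(int)
--
--     for nna in query:
--         region_num = int(nna["location_FK__region"])
--         region_counts[region_num] = nna["count"]
--
--     final_list = []
--     for i in range(1, 17):  # Para las 16 regiones
--         if i in region_counts:
--             final_list.append(region_counts[i])
--         else:
--             final_list.append(0)
--
--     return final_list
-- ===== SOURCE B (Python) =====
-- def list_chats(query):
--     def count_for(region):
--         for nna in reversed(query):
--             if int(nna["location_FK__region"]) == region: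
--                 return nna["count"]
--         return 0
--     return [count_for(i) for i in range(1, 17)]
-- ===== Notes on version B (the rewrite author's own statement) =====
-- stated objective: alternative
-- what changed: B inverts the traversal: instead of scattering rows into a dict and reading it back, it gathers each of the 16 output slots directly by scanning the query backwards for the last row with that region (last write wins), so no intermediate mapping is built at all.
import Mathlib
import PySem

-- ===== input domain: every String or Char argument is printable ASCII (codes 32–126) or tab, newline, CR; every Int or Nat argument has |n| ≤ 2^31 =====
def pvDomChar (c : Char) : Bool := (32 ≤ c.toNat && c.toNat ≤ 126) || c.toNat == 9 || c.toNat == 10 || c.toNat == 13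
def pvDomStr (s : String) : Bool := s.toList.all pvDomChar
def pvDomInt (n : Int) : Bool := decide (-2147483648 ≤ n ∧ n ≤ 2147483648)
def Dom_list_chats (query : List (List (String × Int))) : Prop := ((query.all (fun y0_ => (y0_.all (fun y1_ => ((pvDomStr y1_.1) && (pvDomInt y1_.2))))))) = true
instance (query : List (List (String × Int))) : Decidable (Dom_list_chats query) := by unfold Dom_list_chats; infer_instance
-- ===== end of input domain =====

-- B inverts the traversal: instead of scattering rows into a dict and reading it back over
-- 1..16, it gathers each output slot directly as the count of the LAST row with that region
-- (objective: alternative; same result because a later dict write overwrites an earlier one).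

-- ===== PORT A =====
-- nna["k"] (raising lookup; Pre_ guarantees the key exists, where it equals this getD)
def rowGet (nna : List (String × Int)) (k : String) : Int :=
  (PySem.Dict.mk nna).getD k 0

def list_chats (query : List (List (String × Int))) : List Int :=
  -- region_counts = defaultdict(int); for nna in query: region_counts[int(...)] = nna["count"]
  let region_counts : PySem.Dict Int Int :=
    query.foldl (fun d nna => d.insert (rowGet nna "location_FK__region") (rowGet nna "count"))
      PySem.Dict.empty
  -- for i in range(1, 17): append region_counts[i] if i in region_counts else 0
  (PySem.List.pyRange 1 17 1).foldl
    (fun final_list i =>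
      final_list ++ [if region_counts.contains i then region_counts.getD i 0 else 0]) []

-- ===== PORT B =====
-- count_for(region): first match of a backward scan of query, else 0
def count_for (query : List (List (String × Int))) (region : Int) : Int :=
  match query.reverse.find? (fun nna => rowGet nna "location_FK__region" == region) with
  | some nna => rowGet nna "count"
  | none => 0

def list_chats_alt (query : List (List (String × Int))) : List Int :=
  (PySem.List.pyRange 1 17 1).map (fun i => count_for query i)

-- ===== PRECONDITION & SPEC =====
-- Python A raises KeyError when a row lacks "location_FK__region" or "count"; Pre_ excludes exactly those.
def Pre_list_chats (query : List (List (String × Int))) : Prop :=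
  ∀ nna ∈ query, (PySem.Dict.mk nna).contains "location_FK__region" = true ∧
                 (PySem.Dict.mk nna).contains "count" = true
instance (query : List (List (String × Int))) : Decidable (Pre_list_chats query) := by
  unfold Pre_list_chats; infer_instance

def pvWitness_list_chats : (List (List (String × Int))) :=
  [[("location_FK__region", 3), ("count", 7)], [("location_FK__region", 20), ("count", 1)]]

def Spec_list_chats (query : List (List (String × Int))) (out : List Int) : Prop := out = list_chats_alt query
instance (query : List (List (String × Int))) (out : List Int) : Decidable (Spec_list_chats query out) := by unfold Spec_list_chats; infer_instance

-- ===== CLAIM (what is proved, stated in full; the proofs are below) =====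
def Claim_equal_list_chats : Prop := ∀ (query : List (List (String × Int))), Dom_list_chats query → Pre_list_chats query → Spec_list_chats query (list_chats query)

-- ===== LEMMAS AND PROOFS =====

-- abbreviation for A's scatter loop (proof-side only)
def scatter (query : List (List (String × Int))) (d : PySem.Dict Int Int) : PySem.Dict Int Int :=
  query.foldl (fun d nna => d.insert (rowGet nna "location_FK__region") (rowGet nna "count")) d

lemma ite_contains_getD (d : PySem.Dict Int Int) (i : Int) :
    (if d.contains i then d.getD i 0 else 0) = d.getD i 0 := by
  by_cases h : d.contains i = true
  · simp [h]
  · simp only [Bool.not_eq_true] at h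
    simp [h, PySem.Dict.getD_of_not_contains d (0 : Int) h]

-- the value A reads out of the final dict is exactly B's backward gather
lemma getD_scatter (query : List (List (String × Int))) (d : PySem.Dict Int Int) (i : Int) :
    (scatter query d).getD i 0
      = match query.reverse.find? (fun nna => rowGet nna "location_FK__region" == i) with
        | some nna => rowGet nna "count"
        | none => d.getD i 0 := by
  induction query using List.reverseRecOn generalizing d with
  | nil => simp [scatter]
  | append_singleton xs y ih =>
    rw [List.reverse_append]
    simp only [scatter, List.foldl_append, List.foldl_cons, List.foldl_nil,
               List.reverse_cons, List.reverse_nil, List.nil_append, List.cons_append,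
               List.find?_cons]
    by_cases h : rowGet y "location_FK__region" = i
    · simp [h, PySem.Dict.getD_insert_self]
    · have hb : (rowGet y "location_FK__region" == i) = false := by
        simp [h]
      rw [hb]
      rw [PySem.Dict.getD_insert_of_ne _ _ _ (fun he => h he.symm)]
      exact ih d

lemma count_for_eq (query : List (List (String × Int))) (i : Int) :
    count_for query i = (scatter query PySem.Dict.empty).getD i 0 := by
  rw [getD_scatter, count_for]
  cases query.reverse.find? (fun nna => rowGet nna "location_FK__region" == i) <;>
    simp [PySem.Dict.getD_empty]

theorem list_chats_core (query : List (List (String × Int))) :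
    list_chats query = list_chats_alt query := by
  unfold list_chats list_chats_alt
  have hr : PySem.List.pyRange 1 17 1
      = [1, 2, 3, 4, 5, 6, 7, 8, 9, 10, 11, 12, 13, 14, 15, 16] := by decide
  rw [hr]
  simp only [List.foldl_cons, List.foldl_nil, List.map_cons, List.map_nil,
             ite_contains_getD, count_for_eq, scatter, List.nil_append, List.cons_append]

-- ===== VERDICT (by name: the statement is the Claim_ definition above) =====
theorem list_chats_spec : Claim_equal_list_chats := by
  intro query _ _
  unfold Spec_list_chats
  exact list_chats_core query
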